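-- pv_equiv track=rewrite | github.com/rhoitjadhav/competitive-programming-practice | codesignal/archive/arcade/intro/avoidObstacles0.py | avoidObstacles0
-- ===== SOURCE A (Python) =====
-- def avoidObstacles0(a):
--     d = 2
--
--     while True:
--         flag = False
--         for i in range(len(a)):
--             if (a[i] % d) == 0:
--                 d += 1
--                 flag = True
--                 break
--
--         if flag is False:
--             return d
-- ===== SOURCE B (Python) =====
-- def avoidObstacles0(a):
--     forbidden = set()
--     for x in a:
--         n = abs(x)
--         i = 2
--         while i * i <= n:
--             if n % i == 0:
--                 forbidden.add(i)
--                 forbidden.add(n // i)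
--             i += 1
--         if n >= 2:
--             forbidden.add(n)
--     d = 2
--     while d in forbidden:
--         d += 1
--     return d
-- ===== Notes on version B (the rewrite author's own statement) =====
-- stated objective: alternative
-- what changed: Instead of rescanning the whole array for every candidate d, B builds once a set of all divisors >=2 of each |x| (enumerated up to sqrt|x|) and then returns the first d>=2 not in that set.
-- outside the precondition, e.g. on avoidObstacles0([0]): A does not finish within the time limit, B returns 2
import Mathlib
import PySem

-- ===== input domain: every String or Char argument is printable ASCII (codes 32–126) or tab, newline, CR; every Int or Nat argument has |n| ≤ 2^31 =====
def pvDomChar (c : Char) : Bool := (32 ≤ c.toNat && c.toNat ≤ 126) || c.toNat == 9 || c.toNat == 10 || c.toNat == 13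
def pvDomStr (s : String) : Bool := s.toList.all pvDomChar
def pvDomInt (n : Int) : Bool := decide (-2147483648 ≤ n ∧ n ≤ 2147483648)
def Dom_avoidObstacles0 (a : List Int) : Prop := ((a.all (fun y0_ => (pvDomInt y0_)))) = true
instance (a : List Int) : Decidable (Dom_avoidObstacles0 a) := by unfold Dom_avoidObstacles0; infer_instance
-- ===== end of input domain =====

-- B replaces A's per-candidate full-array scans by a one-time build of the set of all
-- divisors ≥ 2 of each |x|, followed by a single increasing scan (objective: alternative
-- table-based algorithm).

-- ===== PORT A =====
-- the unbounded `while True` is ported with a fuel counter that merely makes it total;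
-- on inputs without 0 the loop exits before the fuel (max |x| + 2) runs out
def pvMaxAbs (a : List Int) : Nat := a.foldl (fun m x => max m x.natAbs) 0

def pvLoopA (a : List Int) (fuel : Nat) (d : Int) : Int :=
  match fuel with
  | 0 => d
  | fuel+1 =>
    -- the inner `for i in range(len(a)) … break` sets flag iff some a[i] % d == 0
    if a.any (fun x => PySem.Int.mod x d == 0) then pvLoopA a fuel (d+1) else d

def avoidObstacles0 (a : List Int) : Int := pvLoopA a (pvMaxAbs a + 2) 2

-- ===== PORT B =====
-- `while i * i <= n` ported with fuel n.toNat (enough: at most sqrt n iterations)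
def pvDivLoop (s : PySem.Set Int) (n : Int) (i : Int) (fuel : Nat) : PySem.Set Int :=
  match fuel with
  | 0 => s
  | fuel+1 =>
    if i * i ≤ n then
      pvDivLoop
        (if PySem.Int.mod n i == 0 then
          PySem.Set.add (PySem.Set.add s i) (PySem.Int.floordiv n i)
        else s) n (i+1) fuel
    else s

def pvForbStep (s : PySem.Set Int) (x : Int) : PySem.Set Int :=
  if 2 ≤ |x| then PySem.Set.add (pvDivLoop s |x| 2 (|x|).toNat) |x|
  else pvDivLoop s |x| 2 (|x|).toNat

def pvForbidden (a : List Int) : PySem.Set Int := a.foldl pvForbStep PySem.Set.empty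

-- `while d in forbidden: d += 1`, with the same totality fuel as A's port
def pvLoopB (f : PySem.Set Int) (fuel : Nat) (d : Int) : Int :=
  match fuel with
  | 0 => d
  | fuel+1 => if PySem.Set.contains f d then pvLoopB f fuel (d+1) else d

def avoidObstacles0_alt (a : List Int) : Int := pvLoopB (pvForbidden a) (pvMaxAbs a + 2) 2

-- ===== PRECONDITION & SPEC =====
-- Pre_ excludes lists containing 0: there A's while-loop never terminates (every d divides 0),
-- so A returns on exactly the inputs admitted here.
def Pre_avoidObstacles0 (a : List Int) : Prop := (0:Int) ∉ a
instance (a : List Int) : Decidable (Pre_avoidObstacles0 a) := by unfold Pre_avoidObstacles0; infer_instance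
def pvWitness_avoidObstacles0 : List Int := [1, 2, 3]

def Spec_avoidObstacles0 (a : List Int) (out : Int) : Prop := out = avoidObstacles0_alt a
instance (a : List Int) (out : Int) : Decidable (Spec_avoidObstacles0 a out) := by unfold Spec_avoidObstacles0; infer_instance

-- ===== CLAIM (what is proved, stated in full; the proofs are below) =====
def Claim_equal_avoidObstacles0 : Prop := ∀ (a : List Int), Dom_avoidObstacles0 a → Pre_avoidObstacles0 a → Spec_avoidObstacles0 a (avoidObstacles0 a)

-- ===== LEMMAS AND PROOFS =====

-- membership in pvDivLoop's accumulator only grows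
theorem pvDivLoop_mono (s : PySem.Set Int) (n i : Int) (fuel : Nat) (d : Int)
    (hd : d ∈ s) : d ∈ pvDivLoop s n i fuel := by
  induction fuel generalizing s i with
  | zero => exact hd
  | succ fuel ih =>
    unfold pvDivLoop
    split
    · apply ih
      split
      · exact (PySem.Set.mem_add _ _ _).2 (Or.inl ((PySem.Set.mem_add _ _ _).2 (Or.inl hd)))
      · exact hd
    · exact hd

-- soundness: everything pvDivLoop adds is a divisor ≥ 2 of n
theorem pvDivLoop_sound (s : PySem.Set Int) (n i : Int) (fuel : Nat) (d : Int)
    (hi : 2 ≤ i) (hd : d ∈ pvDivLoop s n i fuel) : d ∈ s ∨ (2 ≤ d ∧ d ∣ n) := by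
  induction fuel generalizing s i with
  | zero => exact Or.inl hd
  | succ fuel ih =>
    unfold pvDivLoop at hd
    split at hd
    · rename_i hcond
      rcases ih _ _ (by omega) hd with h | h
      · split at h
        · rename_i hmod
          have hdvd : i ∣ n := (PySem.Int.mod_eq_zero_iff_dvd n i).1 (by simpa using hmod)
          rcases (PySem.Set.mem_add _ _ _).1 h with h2 | h2
          · rcases (PySem.Set.mem_add _ _ _).1 h2 with h3 | h3
            · exact Or.inl h3
            · subst h3; exact Or.inr ⟨hi, hdvd⟩
          · subst h2
            have hipos : (0:Int) < i := by omega
            rw [PySem.Int.floordiv_eq_ediv_of_pos hipos]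
            refine Or.inr ⟨?_, ⟨i, (Int.ediv_mul_cancel hdvd).symm⟩⟩
            have hle : i ≤ n / i := by
              rw [Int.le_ediv_iff_mul_le hipos]; exact hcond
            omega
        · exact Or.inl h
      · exact Or.inr h
    · exact Or.inl hd

-- completeness: the loop reaches any divisor j with j*j ≤ n and adds both j and n/j
theorem pvDivLoop_reach (s : PySem.Set Int) (n i : Int) (fuel : Nat) (j : Int)
    (hi : 0 < i) (hij : i ≤ j) (hjj : j * j ≤ n) (hdvd : j ∣ n)
    (hfuel : (j - i).toNat < fuel) :
    j ∈ pvDivLoop s n i fuel ∧ PySem.Int.floordiv n j ∈ pvDivLoop s n i fuel := by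
  induction fuel generalizing s i with
  | zero => omega
  | succ fuel ih =>
    have hcond : i * i ≤ n :=
      le_trans (mul_le_mul hij hij (by omega) (by omega)) hjj
    unfold pvDivLoop
    rw [if_pos hcond]
    rcases eq_or_lt_of_le hij with heq | hlt
    · subst heq
      have hmod : (PySem.Int.mod n i == 0) = true := by
        simp [(PySem.Int.mod_eq_zero_iff_dvd n i).2 hdvd]
      rw [if_pos hmod]
      exact ⟨pvDivLoop_mono _ _ _ _ _
          ((PySem.Set.mem_add _ _ _).2 (Or.inl ((PySem.Set.mem_add _ _ _).2 (Or.inr rfl)))),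
        pvDivLoop_mono _ _ _ _ _ ((PySem.Set.mem_add _ _ _).2 (Or.inr rfl))⟩
    · exact ih _ (i+1) (by omega) (by omega) (by omega)

-- one foldl step: for x ≠ 0, membership after processing x is membership before,
-- or being a divisor ≥ 2 of x
theorem pvForbStep_mem (s : PySem.Set Int) (x : Int) (hx : x ≠ 0) (d : Int) :
    d ∈ pvForbStep s x ↔ d ∈ s ∨ (2 ≤ d ∧ d ∣ x) := by
  have hn1 : (1:Int) ≤ |x| := by
    rcases lt_or_gt_of_ne hx with h | h
    · rw [abs_of_neg h]; omega
    · rw [abs_of_pos h]; omega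
  have hdvd_abs : ∀ e : Int, e ∣ |x| ↔ e ∣ x := fun e => dvd_abs e x
  unfold pvForbStep
  constructor
  · intro h
    have key : d ∈ pvDivLoop s |x| 2 (|x|).toNat ∨ (d = |x| ∧ 2 ≤ |x|) := by
      split at h
      · rename_i h3
        rcases (PySem.Set.mem_add _ _ _).1 h with h2 | h2
        · exact Or.inl h2
        · exact Or.inr ⟨h2, h3⟩
      · exact Or.inl h
    rcases key with h2 | ⟨h2, h3⟩
    · rcases pvDivLoop_sound _ _ _ _ _ (by omega) h2 with h4 | ⟨h4, h5⟩
      · exact Or.inl h4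
      · exact Or.inr ⟨h4, (hdvd_abs d).1 h5⟩
    · subst h2; exact Or.inr ⟨h3, (hdvd_abs |x|).1 dvd_rfl⟩
  · intro h
    rcases h with h | ⟨hd2, hdvd⟩
    · have hm : d ∈ pvDivLoop s |x| 2 (|x|).toNat := pvDivLoop_mono _ _ _ _ _ h
      split
      · exact (PySem.Set.mem_add _ _ _).2 (Or.inl hm)
      · exact hm
    · have hdvdn : d ∣ |x| := (hdvd_abs d).2 hdvd
      have hdle : d ≤ |x| := Int.le_of_dvd (by omega) hdvdn
      rcases eq_or_lt_of_le hdle with heq | hlt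
      · rw [if_pos (by omega : (2:Int) ≤ |x|)]
        exact (PySem.Set.mem_add _ _ _).2 (Or.inr heq)
      · have hn2 : (2:Int) ≤ |x| := by omega
        rw [if_pos hn2]
        refine (PySem.Set.mem_add _ _ _).2 (Or.inl ?_)
        obtain ⟨q, hq⟩ := hdvdn
        have hqpos : (0:Int) < q := by
          by_cases h0 : q ≤ 0
          · exfalso; nlinarith
          · omega
        have hq2 : (2:Int) ≤ q := by
          by_cases h0 : q < 2
          · exfalso
            have : q = 1 := by omega
            subst this; omega
          · omega
        by_cases hsq : d * d ≤ |x|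
        · exact (pvDivLoop_reach s |x| 2 (|x|).toNat d (by omega) hd2 hsq
            ⟨q, hq⟩ (by omega)).1
        · have hqd : q < d := by nlinarith
          have hqq : q * q ≤ |x| := by nlinarith
          have hqdvd : q ∣ |x| := ⟨d, by rw [hq]; ring⟩
          have hres := (pvDivLoop_reach s |x| 2 (|x|).toNat q (by omega) hq2 hqq
            hqdvd (by omega)).2
          have hfd : PySem.Int.floordiv |x| q = d := by
            rw [PySem.Int.floordiv_eq_ediv_of_pos hqpos, hq, mul_comm]
            exact Int.mul_ediv_cancel_left d (by omega)
          rwa [hfd] at hres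

-- pvForbidden contains exactly the divisors ≥ 2 of the elements (when 0 ∉ a)
theorem pvForbidden_foldl_mem (a : List Int) (s : PySem.Set Int)
    (ha : (0:Int) ∉ a) (d : Int) :
    d ∈ a.foldl pvForbStep s ↔ d ∈ s ∨ ∃ x ∈ a, 2 ≤ d ∧ d ∣ x := by
  induction a generalizing s with
  | nil => simp
  | cons x l ih =>
    have hx : x ≠ 0 := fun h => ha (by simp [h])
    have hl : (0:Int) ∉ l := fun h => ha (List.mem_cons_of_mem _ h)
    simp only [List.foldl_cons]
    rw [ih _ hl, pvForbStep_mem s x hx d]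
    constructor
    · rintro ((h | h) | ⟨y, hy, h⟩)
      · exact Or.inl h
      · exact Or.inr ⟨x, by simp, h⟩
      · exact Or.inr ⟨y, by simp [hy], h⟩
    · rintro (h | ⟨y, hy, h⟩)
      · exact Or.inl (Or.inl h)
      · rcases List.mem_cons.1 hy with rfl | hy'
        · exact Or.inl (Or.inr h)
        · exact Or.inr ⟨y, hy', h⟩

-- the two loop conditions agree for every candidate d ≥ 2
theorem pv_cond_eq (a : List Int) (ha : (0:Int) ∉ a) (d : Int) (hd : 2 ≤ d) :
    (a.any fun x => PySem.Int.mod x d == 0) = PySem.Set.contains (pvForbidden a) d := by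
  have hL : (a.any fun x => PySem.Int.mod x d == 0) = true ↔ ∃ x ∈ a, d ∣ x := by
    rw [List.any_eq_true]
    constructor
    · rintro ⟨x, hx, h⟩
      exact ⟨x, hx, (PySem.Int.mod_eq_zero_iff_dvd x d).1 (by simpa using h)⟩
    · rintro ⟨x, hx, h⟩
      exact ⟨x, hx, by simp [(PySem.Int.mod_eq_zero_iff_dvd x d).2 h]⟩
  have hR : PySem.Set.contains (pvForbidden a) d = true ↔ ∃ x ∈ a, d ∣ x := by
    rw [PySem.Set.contains_iff]
    unfold pvForbidden
    rw [pvForbidden_foldl_mem a PySem.Set.empty ha d]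
    constructor
    · rintro (h | ⟨x, hx, _, h⟩)
      · simp [PySem.Set.empty] at h
      · exact ⟨x, hx, h⟩
    · rintro ⟨x, hx, h⟩
      exact Or.inr ⟨x, hx, hd, h⟩
  rcases h1 : (a.any fun x => PySem.Int.mod x d == 0) with _ | _ <;>
    rcases h2 : PySem.Set.contains (pvForbidden a) d with _ | _
  · rfl
  · exact absurd (hL.2 (hR.1 h2)) (fun hc => by rw [h1] at hc; cases hc)
  · exact absurd (hR.2 (hL.1 h1)) (fun hc => by rw [h2] at hc; cases hc)
  · rfl

-- the two scans agree when their conditions agree pointwise (same fuel)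
theorem pvLoop_congr (a : List Int) (f : PySem.Set Int)
    (h : ∀ e, 2 ≤ e → (a.any fun x => PySem.Int.mod x e == 0) = PySem.Set.contains f e) :
    ∀ (fuel : Nat) (d : Int), 2 ≤ d → pvLoopA a fuel d = pvLoopB f fuel d := by
  intro fuel
  induction fuel with
  | zero => intro d _; rfl
  | succ fuel ih =>
    intro d hd
    unfold pvLoopA pvLoopB
    rw [← h d hd]
    split
    · exact ih (d+1) (by omega)
    · rfl

-- ===== VERDICT (by name: the statement is the Claim_ definition above) =====
theorem avoidObstacles0_spec : Claim_equal_avoidObstacles0 := by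
  intro a _ hpre
  unfold Spec_avoidObstacles0 avoidObstacles0 avoidObstacles0_alt
  exact pvLoop_congr a (pvForbidden a) (fun e he => pv_cond_eq a hpre e he)
    (pvMaxAbs a + 2) 2 (by norm_num)
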